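-- pv_equiv track=rewrite | github.com/reynaldaryansyah25/multimodal-hoax-detection | src/scrape/youtube/crawlingyt2.py | classify_channel_type
-- ===== SOURCE A (Python) =====
-- def classify_channel_type(record):
--     """Auto-classify channel_type untuk data lama"""
--     # Safety check untuk None values
--     channel = (record.get('channel') or '').lower()
--     keyword = (record.get('keyword') or '').lower()
--
--     # Dari channel
--     if any(w in channel for w in ['kompas', 'metro', 'cnn', 'tvone', 'detik', 'bbc']):
--         return 'news'
--     if any(w in channel for w in ['narasi', 'mata najwa', 'deeplab']):
--         return 'analysis'
--     if any(w in channel for w in ['turnbackhoax', 'cekfakta', 'hoax']):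
--         return 'factcheck'
--
--     # Dari keyword
--     if any(w in keyword for w in ['hoax', 'misinformasi', 'cek fakta', 'debunking']):
--         return 'factcheck'
--     if any(w in keyword for w in ['viral', 'heboh', 'trending', 'kontroversi']):
--         return 'viral'
--     if any(w in keyword for w in ['analisis', 'opini', 'diskusi', 'perdebatan']):
--         return 'analysis'
--     if any(w in keyword for w in ['prabowo', 'gibran']):
--         return 'prabowo'
--
--     return 'default'
-- ===== SOURCE B (Python) =====
-- # B: flat keyword->priority maps + argmin accumulation (no early-return rule scan).
-- CHANNEL_PRIO = {
--     'kompas': 0, 'metro': 0, 'cnn': 0, 'tvone': 0, 'detik': 0, 'bbc': 0,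
--     'narasi': 1, 'mata najwa': 1, 'deeplab': 1,
--     'turnbackhoax': 2, 'cekfakta': 2, 'hoax': 2,
-- }
-- KEYWORD_PRIO = {
--     'hoax': 3, 'misinformasi': 3, 'cek fakta': 3, 'debunking': 3,
--     'viral': 4, 'heboh': 4, 'trending': 4, 'kontroversi': 4,
--     'analisis': 5, 'opini': 5, 'diskusi': 5, 'perdebatan': 5,
--     'prabowo': 6, 'gibran': 6,
-- }
-- LABELS = ['news', 'analysis', 'factcheck', 'factcheck', 'viral', 'analysis', 'prabowo', 'default']
--
-- def classify_channel_type(record):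
--     """Auto-classify channel_type untuk data lama"""
--     channel = (record.get('channel') or '').lower()
--     keyword = (record.get('keyword') or '').lower()
--     best = 7
--     for kw, prio in CHANNEL_PRIO.items():
--         if prio < best and kw in channel:
--             best = prio
--     for kw, prio in KEYWORD_PRIO.items():
--         if prio < best and kw in keyword:
--             best = prio
--     return LABELS[best]
-- ===== Notes on version B (the rewrite author's own statement) =====
-- stated objective: alternative
-- what changed: Replaces the first-match cascade of seven any(...) branches with two flat keyword-to-priority maps and an argmin accumulator: every keyword is tested individually (with a prio<best prune), the minimum matching priority is kept, and the label is looked up by index; correct because rule priorities are grouped ascending, so the minimum-priority match is exactly the first matching rule.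
import Mathlib
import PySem

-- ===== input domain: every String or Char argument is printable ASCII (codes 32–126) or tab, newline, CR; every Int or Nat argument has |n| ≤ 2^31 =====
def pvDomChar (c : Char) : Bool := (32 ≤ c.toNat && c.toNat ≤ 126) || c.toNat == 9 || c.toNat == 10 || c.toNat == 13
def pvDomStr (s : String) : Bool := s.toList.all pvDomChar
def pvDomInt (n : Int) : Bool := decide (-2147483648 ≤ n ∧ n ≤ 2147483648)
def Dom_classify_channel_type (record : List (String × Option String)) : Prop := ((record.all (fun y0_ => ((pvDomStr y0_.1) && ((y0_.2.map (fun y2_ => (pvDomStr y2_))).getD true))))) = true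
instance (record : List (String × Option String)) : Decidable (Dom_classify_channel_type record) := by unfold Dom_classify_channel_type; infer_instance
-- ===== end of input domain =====

-- B replaces A's first-match cascade with flat keyword->priority maps and an argmin accumulator (alternative decomposition).


-- ===== PORT A =====
def classify_channel_type (record : List (String × Option String)) : String :=
  -- channel = (record.get('channel') or '').lower(); likewise keyword
  let channel := PySem.Str.lower ((((PySem.Dict.mk record).get? "channel").getD none).getD "")
  let keyword := PySem.Str.lower ((((PySem.Dict.mk record).get? "keyword").getD none).getD "")
  if ["kompas", "metro", "cnn", "tvone", "detik", "bbc"].any (fun w => PySem.Str.isIn w channel) then "news"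
  else if ["narasi", "mata najwa", "deeplab"].any (fun w => PySem.Str.isIn w channel) then "analysis"
  else if ["turnbackhoax", "cekfakta", "hoax"].any (fun w => PySem.Str.isIn w channel) then "factcheck"
  else if ["hoax", "misinformasi", "cek fakta", "debunking"].any (fun w => PySem.Str.isIn w keyword) then "factcheck"
  else if ["viral", "heboh", "trending", "kontroversi"].any (fun w => PySem.Str.isIn w keyword) then "viral"
  else if ["analisis", "opini", "diskusi", "perdebatan"].any (fun w => PySem.Str.isIn w keyword) then "analysis"
  else if ["prabowo", "gibran"].any (fun w => PySem.Str.isIn w keyword) then "prabowo"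
  else "default"

-- ===== PORT B =====
-- module-level tables CHANNEL_PRIO / KEYWORD_PRIO / LABELS of Source B (dicts as association lists)
def pvChannelPrio : List (String × Int) :=
  [("kompas", 0), ("metro", 0), ("cnn", 0), ("tvone", 0), ("detik", 0), ("bbc", 0),
   ("narasi", 1), ("mata najwa", 1), ("deeplab", 1),
   ("turnbackhoax", 2), ("cekfakta", 2), ("hoax", 2)]
def pvKeywordPrio : List (String × Int) :=
  [("hoax", 3), ("misinformasi", 3), ("cek fakta", 3), ("debunking", 3),
   ("viral", 4), ("heboh", 4), ("trending", 4), ("kontroversi", 4),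
   ("analisis", 5), ("opini", 5), ("diskusi", 5), ("perdebatan", 5),
   ("prabowo", 6), ("gibran", 6)]
def pvLabels : List String :=
  ["news", "analysis", "factcheck", "factcheck", "viral", "analysis", "prabowo", "default"]

def classify_channel_type_alt (record : List (String × Option String)) : String :=
  let channel := PySem.Str.lower ((((PySem.Dict.mk record).get? "channel").getD none).getD "")
  let keyword := PySem.Str.lower ((((PySem.Dict.mk record).get? "keyword").getD none).getD "")
  let best1 := pvChannelPrio.foldl
    (fun best p => if p.2 < best ∧ PySem.Str.isIn p.1 channel then p.2 else best) 7
  let best := pvKeywordPrio.foldl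
    (fun best p => if p.2 < best ∧ PySem.Str.isIn p.1 keyword then p.2 else best) best1
  -- LABELS[best]; best is always in [0,7] so the IndexError default is unreachable
  (PySem.List.pyGet? pvLabels best).getD ""

-- ===== PRECONDITION & SPEC =====
def Spec_classify_channel_type (record : List (String × Option String)) (out : String) : Prop := out = classify_channel_type_alt record
instance (record : List (String × Option String)) (out : String) : Decidable (Spec_classify_channel_type record out) := by unfold Spec_classify_channel_type; infer_instance

-- ===== CLAIM =====
def Claim_equal_classify_channel_type : Prop := ∀ (record : List (String × Option String)), Dom_classify_channel_type record → Spec_classify_channel_type record (classify_channel_type record)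

-- ===== LEMMAS AND PROOFS =====

-- Folding a constant-priority group of keywords: result is min-with-p iff any keyword matches.
theorem pv_fold_group (field : String) (p b : Int) (kws : List String) :
    (kws.map (fun k => (k, p))).foldl
      (fun best q => if q.2 < best ∧ PySem.Str.isIn q.1 field then q.2 else best) b
    = if kws.any (fun w => PySem.Str.isIn w field) then (if p < b then p else b) else b := by
  induction kws generalizing b with
  | nil => simp
  | cons k rest ih =>
    simp only [List.map_cons, List.foldl_cons, List.any_cons]
    by_cases hm : PySem.Str.isIn k field = true
    · by_cases hp : p < b
      · rw [if_pos ⟨hp, hm⟩, ih]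
        simp only [PySem.Str.isIn_eq] at hm
        simp [hm, hp]
      · rw [if_neg (fun h => hp h.1), ih]
        simp only [PySem.Str.isIn_eq] at hm
        simp [hm, hp]
    · rw [Bool.not_eq_true] at hm
      rw [if_neg (fun h => by rw [hm] at h; exact Bool.false_ne_true h.2), ih]
      simp only [PySem.Str.isIn_eq] at hm
      simp [hm]

theorem classify_channel_type_spec_general (channel keyword : String) :
    (if ["kompas", "metro", "cnn", "tvone", "detik", "bbc"].any (fun w => PySem.Str.isIn w channel) then "news"
     else if ["narasi", "mata najwa", "deeplab"].any (fun w => PySem.Str.isIn w channel) then "analysis"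
     else if ["turnbackhoax", "cekfakta", "hoax"].any (fun w => PySem.Str.isIn w channel) then "factcheck"
     else if ["hoax", "misinformasi", "cek fakta", "debunking"].any (fun w => PySem.Str.isIn w keyword) then "factcheck"
     else if ["viral", "heboh", "trending", "kontroversi"].any (fun w => PySem.Str.isIn w keyword) then "viral"
     else if ["analisis", "opini", "diskusi", "perdebatan"].any (fun w => PySem.Str.isIn w keyword) then "analysis"
     else if ["prabowo", "gibran"].any (fun w => PySem.Str.isIn w keyword) then "prabowo"
     else "default")
    = (PySem.List.pyGet? pvLabels
        (pvKeywordPrio.foldl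
          (fun best p => if p.2 < best ∧ PySem.Str.isIn p.1 keyword then p.2 else best)
          (pvChannelPrio.foldl
            (fun best p => if p.2 < best ∧ PySem.Str.isIn p.1 channel then p.2 else best) 7))).getD "" := by
  have hc : pvChannelPrio
      = (["kompas", "metro", "cnn", "tvone", "detik", "bbc"].map (fun k => (k, (0 : Int))))
        ++ (["narasi", "mata najwa", "deeplab"].map (fun k => (k, (1 : Int))))
        ++ (["turnbackhoax", "cekfakta", "hoax"].map (fun k => (k, (2 : Int)))) := by rfl
  have hk : pvKeywordPrio
      = (["hoax", "misinformasi", "cek fakta", "debunking"].map (fun k => (k, (3 : Int))))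
        ++ (["viral", "heboh", "trending", "kontroversi"].map (fun k => (k, (4 : Int))))
        ++ (["analisis", "opini", "diskusi", "perdebatan"].map (fun k => (k, (5 : Int))))
        ++ (["prabowo", "gibran"].map (fun k => (k, (6 : Int)))) := by rfl
  rw [hc, hk]
  rw [List.foldl_append, List.foldl_append, List.foldl_append, List.foldl_append, List.foldl_append]
  rw [pv_fold_group, pv_fold_group, pv_fold_group, pv_fold_group, pv_fold_group, pv_fold_group, pv_fold_group]
  generalize ["kompas", "metro", "cnn", "tvone", "detik", "bbc"].any (fun w => PySem.Str.isIn w channel) = b0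
  generalize ["narasi", "mata najwa", "deeplab"].any (fun w => PySem.Str.isIn w channel) = b1
  generalize ["turnbackhoax", "cekfakta", "hoax"].any (fun w => PySem.Str.isIn w channel) = b2
  generalize ["hoax", "misinformasi", "cek fakta", "debunking"].any (fun w => PySem.Str.isIn w keyword) = b3
  generalize ["viral", "heboh", "trending", "kontroversi"].any (fun w => PySem.Str.isIn w keyword) = b4
  generalize ["analisis", "opini", "diskusi", "perdebatan"].any (fun w => PySem.Str.isIn w keyword) = b5
  generalize ["prabowo", "gibran"].any (fun w => PySem.Str.isIn w keyword) = b6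
  revert b0 b1 b2 b3 b4 b5 b6
  decide

-- ===== VERDICT =====
theorem classify_channel_type_spec : Claim_equal_classify_channel_type := by
  intro record _
  unfold Spec_classify_channel_type classify_channel_type classify_channel_type_alt
  exact classify_channel_type_spec_general _ _
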